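-- pv_equiv track=rewrite | github.com/donut0310/Problem-Solving-Python- | Programmers/PCCP/외톨이 알파벳.py | solution
-- ===== SOURCE A (Python) =====
-- from collections import defaultdict
--
-- def solution(input_string):
--     answer = ''
--     info = defaultdict(tuple)
--
--     for i, c in enumerate(input_string):
--         if not info[c]:
--             info[c] = (i, 0) #(마지막 인덱스, 후보 여부)
--         else:
--             if i - info[c][0] == 1:
--                 info[c] = (i, 0)
--             else:
--                 info[c] = (info[c][0], 1)
--
--     arr = []
--     for key in info:
--         if info[key][1] == 1: arr.append(key)
--
--     if len(arr) == len(input_string) or not arr: answer = 'N'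
--     else: answer = ''.join(sorted(arr))
--     return answer
-- ===== SOURCE B (Python) =====
-- def solution(input_string):
--     positions = {}
--     for i, c in enumerate(input_string):
--         positions.setdefault(c, []).append(i)
--     lonely = [c for c, ps in positions.items() if ps[-1] - ps[0] != len(ps) - 1]
--     return ''.join(sorted(lonely)) if lonely else 'N'
-- ===== Notes on version B (the rewrite author's own statement) =====
-- stated objective: simpler
-- what changed: Replaces A's streaming (last-index, candidate-flag) state machine over the string with a two-phase build: collect each character's index list in one pass, then mark a letter lonely when its positions are not one contiguous block (last - first != count - 1).
import Mathlib
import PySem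

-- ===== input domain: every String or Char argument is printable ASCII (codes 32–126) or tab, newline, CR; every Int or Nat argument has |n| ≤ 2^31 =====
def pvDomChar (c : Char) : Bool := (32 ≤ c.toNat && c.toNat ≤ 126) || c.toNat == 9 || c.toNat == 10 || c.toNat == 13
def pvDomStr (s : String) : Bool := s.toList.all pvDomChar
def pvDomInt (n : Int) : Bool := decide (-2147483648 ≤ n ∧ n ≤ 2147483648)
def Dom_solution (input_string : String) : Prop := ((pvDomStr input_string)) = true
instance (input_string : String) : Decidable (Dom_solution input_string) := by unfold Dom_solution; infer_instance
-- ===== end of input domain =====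

-- B replaces A's streaming (last-index, flag) state machine with a simpler two-phase
-- build: index lists per character, then a contiguity check; equal outputs are proved.

-- ===== PORT A =====
def solution (input_string : String) : String :=
  let info := (PySem.List.enumerate input_string.toList 0).foldl
    (fun d p =>
      d.insert p.2 (match d.get? p.2 with
        | none => (p.1, (0 : Int))
        | some pr => if p.1 - pr.1 = 1 then (p.1, 0) else (pr.1, 1)))
    PySem.Dict.empty
  let arr := info.keys.filter (fun k => (info.getD k (0, 0)).2 == 1)
  if arr.length = input_string.toList.length ∨ arr = [] then "N"
  else String.ofList (PySem.List.sorted arr (fun x => x) false)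

-- ===== PORT B =====
def solution_alt (input_string : String) : String :=
  let positions := (PySem.List.enumerate input_string.toList 0).foldl
    (fun d p => d.modify p.2 [] (fun l => l ++ [p.1])) PySem.Dict.empty
  let lonely := (positions.items.filter
      (fun q => PySem.List.pyGetD q.2 (-1) 0 - PySem.List.pyGetD q.2 0 0 ≠ (q.2.length : Int) - 1)).map (·.1)
  if lonely = [] then "N"
  else String.ofList (PySem.List.sorted lonely (fun x => x) false)

-- ===== PRECONDITION & SPEC =====
def Spec_solution (input_string : String) (out : String) : Prop := out = solution_alt input_string
instance (input_string : String) (out : String) : Decidable (Spec_solution input_string out) := by unfold Spec_solution; infer_instance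

-- ===== CLAIM (what is proved, stated in full; the proofs are below) =====
def Claim_equal_solution : Prop := ∀ (input_string : String), Dom_solution input_string → Spec_solution input_string (solution input_string)

-- ===== LEMMAS AND PROOFS =====

def pvOccs (l : List (Int × Char)) (c : Char) : List Int :=
  (l.filter (fun p => p.2 == c)).map (·.1)
def pvChain (o : List Int) : Prop := List.IsChain (fun a b => b = a + 1) o
def pvInvA (n : Int) (r : Option (Int × Int)) (o : List Int) : Prop :=
  match o with
  | [] => r = none
  | _ :: _ =>
      (pvChain o ∧ r = some (o.getLastD 0, 0) ∧ o.getLastD 0 < n)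
      ∨ (¬ pvChain o ∧ ∃ last, r = some (last, 1) ∧ last + 2 ≤ n)
theorem pvInvA_mono {n m : Int} {r : Option (Int × Int)} {o : List Int}
    (hnm : n ≤ m) (h : pvInvA n r o) : pvInvA m r o := by
  cases o with
  | nil => exact h
  | cons a t =>
    rcases h with ⟨h1, h2, h3⟩ | ⟨h1, l, h2, h3⟩
    · exact Or.inl ⟨h1, h2, by omega⟩
    · exact Or.inr ⟨h1, l, h2, by omega⟩

theorem pv_getLast?_cons (a : Int) (t : List Int) :
    (a :: t).getLast? = some ((a :: t).getLastD 0) := by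
  rw [List.getLastD_eq_getLast?]
  cases h : (a :: t).getLast? with
  | none => simp at h
  | some v => rfl

theorem pvInvA_step_none {n : Int} {o : List Int}
    (h : pvInvA n none o) :
    pvInvA (n + 1) (some (n, (0 : Int))) (o ++ [n]) := by
  cases o with
  | nil =>
    refine Or.inl ⟨?_, by simp, by simp⟩
    simp [pvChain]
  | cons a t =>
    rcases h with ⟨-, h2, -⟩ | ⟨-, L, h2, -⟩ <;> simp at h2

theorem pvInvA_step_some {n : Int} {o : List Int} {pr : Int × Int}
    (h : pvInvA n (some pr) o) :
    pvInvA (n + 1) (some (if n - pr.1 = 1 then (n, (0 : Int)) else (pr.1, 1))) (o ++ [n]) := by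
  cases o with
  | nil => simp [pvInvA] at h
  | cons a t =>
    have hL? : (a :: t).getLast? = some ((a :: t).getLastD 0) := pv_getLast?_cons a t
    have hlast2 : ((a :: t) ++ [n]).getLastD 0 = n := by
      rw [List.getLastD_eq_getLast?, List.getLast?_concat]; rfl
    rcases h with ⟨h1, h2, h3⟩ | ⟨h1, L, h2, h3⟩
    · injection h2 with h2; subst h2
      dsimp only
      by_cases hd : n - (a :: t).getLastD 0 = 1
      · refine Or.inl ⟨?_, ?_, ?_⟩
        · unfold pvChain at h1 ⊢
          rw [List.isChain_append]
          refine ⟨h1, by simp, ?_⟩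
          intro x hx y hy
          rw [hL?] at hx
          have hx' : (a :: t).getLastD 0 = x := Option.mem_some_iff.mp hx
          have hy' : n = y := Option.mem_some_iff.mp hy
          omega
        · rw [if_pos hd, hlast2]
        · rw [hlast2]; omega
      · refine Or.inr ⟨?_, (a :: t).getLastD 0, ?_, ?_⟩
        · unfold pvChain
          rw [List.isChain_append]
          rintro ⟨-, -, hlastR⟩
          have := hlastR ((a :: t).getLastD 0) (by rw [hL?]; rfl) n rfl
          omega
        · rw [if_neg hd]
        · omega
    · injection h2 with h2; subst h2
      dsimp only
      have hne : ¬ n - L = 1 := by omega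
      refine Or.inr ⟨?_, L, ?_, by omega⟩
      · unfold pvChain at h1 ⊢
        rw [List.isChain_append]
        rintro ⟨hc, -, -⟩
        exact h1 hc
      · rw [if_neg hne]

theorem pv_pyGetD_last (o : List Int) (h : o ≠ []) :
    PySem.List.pyGetD o (-1) 0 = o.getLastD 0 := by
  cases o with
  | nil => simp at h
  | cons a t =>
    simp [PySem.List.pyGetD, PySem.List.pyGet?, PySem.List.pyIdx?,
      List.getLastD_eq_getLast?, List.getLast?_eq_getElem?]

theorem pv_pyGetD_head (o : List Int) (h : o ≠ []) :
    PySem.List.pyGetD o 0 0 = o.headD 0 := by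
  cases o with
  | nil => simp at h
  | cons a t => simp [PySem.List.pyGetD, PySem.List.pyGet?, PySem.List.pyIdx?]

theorem pvSpan : ∀ (t : List Int) (a : Int), (a :: t).Pairwise (· < ·) →
    ((t.length : Int) ≤ t.getLastD a - a) ∧ (pvChain (a :: t) ↔ t.getLastD a - a = t.length) := by
  intro t
  induction t with
  | nil => intro a _; simp [pvChain]
  | cons b t' ih =>
    intro a hp
    have hab : a < b := List.rel_of_pairwise_cons hp (List.mem_cons_self)
    have hp' : (b :: t').Pairwise (· < ·) := hp.of_cons
    obtain ⟨ih1, ih2⟩ := ih b hp'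
    rw [List.getLastD_cons]
    constructor
    · simp only [List.length_cons]; push_cast; omega
    · rw [show pvChain (a :: b :: t') ↔ (b = a + 1 ∧ pvChain (b :: t')) from List.isChain_cons_cons, ih2]
      simp only [List.length_cons]; push_cast; omega

theorem pvA_loop (c : Char) : ∀ (rest : List Char) (n : Int) (d : PySem.Dict Char (Int × Int)) (o : List Int),
    pvInvA n (d.get? c) o →
    pvInvA (n + rest.length)
      (((PySem.List.enumerate rest n).foldl
        (fun d p =>
          d.insert p.2 (match d.get? p.2 with
            | none => (p.1, (0 : Int))
            | some pr => if p.1 - pr.1 = 1 then (p.1, 0) else (pr.1, 1))) d).get? c)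
      (o ++ pvOccs (PySem.List.enumerate rest n) c) := by
  intro rest
  induction rest with
  | nil =>
    intro n d o h
    simpa [pvOccs] using h
  | cons x rest ih =>
    intro n d o h
    rw [PySem.List.enumerate_cons]
    simp only [List.foldl_cons]
    have hcast : n + ((x :: rest).length : Int) = (n + 1) + (rest.length : Int) := by
      push_cast [List.length_cons]; ring
    rw [hcast]
    by_cases hx : x = c
    · subst hx
      have hocc : pvOccs ((n, x) :: PySem.List.enumerate rest (n + 1)) x =
          [n] ++ pvOccs (PySem.List.enumerate rest (n + 1)) x := by
        simp [pvOccs, List.filter_cons]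
      rw [hocc, ← List.append_assoc]
      apply ih (n + 1) _ (o ++ [n])
      rw [PySem.Dict.get?_insert, if_pos rfl]
      rcases hgd : d.get? x with _ | pr
      · rw [hgd] at h
        simpa using pvInvA_step_none h
      · rw [hgd] at h
        simpa using pvInvA_step_some h
    · have hocc : pvOccs ((n, x) :: PySem.List.enumerate rest (n + 1)) c =
          pvOccs (PySem.List.enumerate rest (n + 1)) c := by
        simp [pvOccs, List.filter_cons, (by simpa using hx : ¬ (x == c) = true)]
      rw [hocc]
      apply ih (n + 1) _ o
      rw [PySem.Dict.get?_insert, if_neg (fun hh => hx hh.symm)]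
      exact pvInvA_mono (by omega) h


theorem pvOccs_len (c : Char) : ∀ (xs : List Char) (s : Int),
    (pvOccs (PySem.List.enumerate xs s) c).length = xs.count c := by
  intro xs
  induction xs with
  | nil => intro s; simp [pvOccs]
  | cons x xs ih =>
    intro s
    have h := ih (s + 1)
    simp only [pvOccs] at h ⊢
    by_cases hx : x = c
    · simp [PySem.List.enumerate_cons, List.filter_cons, hx, List.count_cons, h]
    · simp [PySem.List.enumerate_cons, List.filter_cons, List.count_cons, h,
        (by simpa using hx : ¬ (x == c) = true), hx]
theorem pvOccs_pairwise (c : Char) (xs : List Char) (s : Int) :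
    (pvOccs (PySem.List.enumerate xs s) c).Pairwise (· < ·) := by
  have h := PySem.List.pairwise_lt_enumerate xs s
  exact List.pairwise_map.mpr (h.filter _)
theorem pvB_loop (c : Char) : ∀ (l : List (Int × Char)) (d : PySem.Dict Char (List Int)),
    ((l.foldl (fun d p => d.modify p.2 [] (fun acc => acc ++ [p.1])) d).getD c []) =
      d.getD c [] ++ pvOccs l c := by
  intro l
  induction l with
  | nil => intro d; simp [pvOccs]
  | cons p l ih =>
    intro d
    simp only [List.foldl_cons, ih, pvOccs, List.filter_cons]
    rw [PySem.Dict.getD_modify]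
    by_cases hc : c = p.2
    · simp [hc, pvOccs]
    · simp [hc, (by simpa using fun h => hc (by simp [h]) : ¬ (p.2 == c) = true), pvOccs]

-- proof-only helper names for the two folds and filter predicates (definitionally the port bodies)
def pvInfo (s : List Char) : PySem.Dict Char (Int × Int) :=
  (PySem.List.enumerate s 0).foldl
    (fun d p =>
      d.insert p.2 (match d.get? p.2 with
        | none => (p.1, (0 : Int))
        | some pr => if p.1 - pr.1 = 1 then (p.1, 0) else (pr.1, 1))) PySem.Dict.empty

def pvPos (s : List Char) : PySem.Dict Char (List Int) :=
  (PySem.List.enumerate s 0).foldl (fun d p => d.modify p.2 [] (fun acc => acc ++ [p.1])) PySem.Dict.empty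

def pvPredA (s : List Char) (k : Char) : Bool := ((pvInfo s).getD k (0, 0)).2 == 1

def pvPredB (q : Char × List Int) : Bool :=
  decide (PySem.List.pyGetD q.2 (-1) 0 - PySem.List.pyGetD q.2 0 0 ≠ (q.2.length : Int) - 1)

theorem pv_char (s : List Char) (c : Char) (hc : c ∈ s) :
    pvPredA s c = pvPredB (c, (pvPos s).getD c []) ∧ (pvPredA s c = true → 2 ≤ s.count c) := by
  have hInv : pvInvA (0 + (s.length : Int)) ((pvInfo s).get? c)
      ([] ++ pvOccs (PySem.List.enumerate s 0) c) :=
    pvA_loop c s 0 PySem.Dict.empty [] (by simp [pvInvA])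
  rw [List.nil_append] at hInv
  have hB : (pvPos s).getD c [] = pvOccs (PySem.List.enumerate s 0) c := by
    have h := pvB_loop c (PySem.List.enumerate s 0) PySem.Dict.empty
    simpa [pvPos] using h
  have hlen := pvOccs_len c s 0
  have hcnt : 0 < s.count c := List.count_pos_iff.mpr hc
  obtain ⟨a, t, hot⟩ : ∃ a t, pvOccs (PySem.List.enumerate s 0) c = a :: t := by
    cases h : pvOccs (PySem.List.enumerate s 0) c with
    | nil => rw [h] at hlen; simp at hlen; omega
    | cons a t => exact ⟨a, t, rfl⟩
  have hpw := pvOccs_pairwise c s 0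
  rw [hot] at hInv hB hlen hpw
  obtain ⟨-, hspan⟩ := pvSpan t a hpw
  have hBval : pvPredB (c, (pvPos s).getD c []) =
      decide (t.getLastD a - a ≠ (t.length : Int)) := by
    rw [hB]
    unfold pvPredB
    rw [pv_pyGetD_last _ (by simp), pv_pyGetD_head _ (by simp)]
    simp only [List.getLastD_cons, List.headD_cons, List.length_cons]
    have h1 : ((t.length + 1 : Nat) : Int) - 1 = (t.length : Int) := by push_cast; ring
    rw [h1]
  simp only [List.length_cons] at hlen
  rcases hInv with ⟨hch, hr, -⟩ | ⟨hnch, L, hr, -⟩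
  · have hgd : (pvInfo s).getD c (0, 0) = ((a :: t).getLastD 0, 0) :=
      PySem.Dict.getD_of_get?_eq_some _ _ hr
    have heq : t.getLastD a - a = (t.length : Int) := hspan.mp hch
    constructor
    · rw [hBval]
      simp only [List.getLastD_eq_getLast?] at heq
      simp [pvPredA, hgd, heq]
    · intro hp
      rw [pvPredA, hgd] at hp
      simp at hp
  · have hgd : (pvInfo s).getD c (0, 0) = (L, 1) :=
      PySem.Dict.getD_of_get?_eq_some _ _ hr
    have hne : t.getLastD a - a ≠ (t.length : Int) := fun he => hnch (hspan.mpr he)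
    constructor
    · rw [hBval]
      simp only [List.getLastD_eq_getLast?] at hne
      simp [pvPredA, hgd, hne]
    · intro _
      have ht : t ≠ [] := by
        intro h0
        subst h0
        exact hnch (by simp [pvChain])
      cases t with
      | nil => exact absurd rfl ht
      | cons b t2 => simp at hlen; omega

-- ===== VERDICT (by name: the statement is the Claim_ definition above) =====
theorem solution_spec : Claim_equal_solution := by
  intro s _
  show solution s = solution_alt s
  have hA : solution s =
      (if ((pvInfo s.toList).keys.filter (pvPredA s.toList)).length = s.toList.length ∨
          (pvInfo s.toList).keys.filter (pvPredA s.toList) = [] then "N"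
       else String.ofList (PySem.List.sorted ((pvInfo s.toList).keys.filter (pvPredA s.toList))
              (fun x => x) false)) := rfl
  have hBdef : solution_alt s =
      (if ((pvPos s.toList).items.filter pvPredB).map (·.1) = [] then "N"
       else String.ofList (PySem.List.sorted (((pvPos s.toList).items.filter pvPredB).map (·.1))
              (fun x => x) false)) := rfl
  rw [hA, hBdef]
  have hkA : (pvInfo s.toList).keys = PySem.Set.update [] s.toList := by
    unfold pvInfo
    rw [PySem.Dict.keys_foldl_insert_key]
    simp [PySem.List.map_snd_enumerate]
  have hkB : (pvPos s.toList).keys = PySem.Set.update [] s.toList := by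
    unfold pvPos
    rw [PySem.Dict.keys_foldl_modify_key]
    simp [PySem.List.map_snd_enumerate]
  have hndA : (pvInfo s.toList).keys.Nodup := by
    unfold pvInfo
    exact PySem.Dict.nodup_keys_foldl_insert_key _ _ _ _ (by simp)
  have hndB : (pvPos s.toList).keys.Nodup := by
    unfold pvPos
    exact PySem.Dict.nodup_keys_foldl_modify_key _ _ _ _ _ (by simp)
  have hmem : ∀ x, x ∈ (pvInfo s.toList).keys → x ∈ s.toList := by
    intro x hx
    rw [hkA] at hx
    exact ((PySem.Set.mem_update _ _ _).mp hx).resolve_left (by simp)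
  have hkk : (pvPos s.toList).keys = (pvInfo s.toList).keys := by rw [hkA, hkB]
  have harr : ((pvPos s.toList).items.filter pvPredB).map (·.1) =
      (pvInfo s.toList).keys.filter (pvPredA s.toList) := by
    rw [PySem.Dict.items_eq_map_keys (pvPos s.toList) hndB [], List.filter_map, List.map_map]
    have hid : ((fun (q : Char × List Int) => q.1) ∘ (fun k => (k, (pvPos s.toList).getD k []))) =
        id := rfl
    rw [hid, List.map_id, hkk]
    apply List.filter_congr
    intro x hx
    simp only [Function.comp]
    exact ((pv_char s.toList x (hmem x hx)).1).symm
  rw [harr]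
  by_cases he : (pvInfo s.toList).keys.filter (pvPredA s.toList) = []
  · simp [he]
  · have h2 : ∀ x ∈ (pvInfo s.toList).keys.filter (pvPredA s.toList), 2 ≤ s.toList.count x :=
      fun x hx => (pv_char s.toList x (hmem x (List.mem_of_mem_filter hx))).2 (List.of_mem_filter hx)
    have hnd : ((pvInfo s.toList).keys.filter (pvPredA s.toList)).Nodup := hndA.filter _
    have hlt : ((pvInfo s.toList).keys.filter (pvPredA s.toList)).length < s.toList.length := by
      set arr := (pvInfo s.toList).keys.filter (pvPredA s.toList) with harrdef
      have hsub : arr.toFinset ⊆ s.toList.toFinset := by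
        intro x hx
        rw [List.mem_toFinset] at hx ⊢
        exact hmem x (List.mem_of_mem_filter hx)
      have h1 : 2 * arr.length ≤ s.toList.length :=
        calc 2 * arr.length = ∑ _x ∈ arr.toFinset, 2 := by
              rw [Finset.sum_const, List.toFinset_card_of_nodup hnd, smul_eq_mul, Nat.mul_comm]
          _ ≤ ∑ x ∈ arr.toFinset, s.toList.count x :=
              Finset.sum_le_sum (fun x hx => h2 x (List.mem_toFinset.mp hx))
          _ ≤ ∑ x ∈ s.toList.toFinset, s.toList.count x :=
              Finset.sum_le_sum_of_subset_of_nonneg hsub (fun _ _ _ => Nat.zero_le _)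
          _ = s.toList.length := List.sum_toFinset_count_eq_length s.toList
      have hpos : 0 < arr.length := List.length_pos_iff.mpr he
      omega
    rw [if_neg (fun h => h.elim (fun h1 => absurd h1 (Nat.ne_of_lt hlt)) he), if_neg he]
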